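-- pv_equiv track=rewrite | github.com/Tatiana16-cloud/iot-stack | bridge_thingspeak/bridge.py | normalize_topics
-- ===== SOURCE A (Python) =====
-- from typing import Dict, List, Tuple, Any
--
-- def normalize_topics(topics: List[str]) -> List[str]:
--     """
--     No inventa suscripciones nuevas; solo limpia espacios y barras duplicadas.
--     """
--     out = []
--     for t in topics:
--         t = (t or "").strip()
--         if not t:
--             continue
--         while "//" in t:
--             t = t.replace("//", "/")
--         out.append(t)
--     return out
-- ===== SOURCE B (Python) =====
-- def normalize_topics(topics):
--     out = []
--     for t in topics:
--         t = (t or "").strip()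
--         if not t:
--             continue
--         buf = []
--         for ch in t:
--             if ch == '/' and buf and buf[-1] == '/':
--                 continue
--             buf.append(ch)
--         out.append(''.join(buf))
--     return out
-- ===== Notes on version B (the rewrite author's own statement) =====
-- stated objective: alternative
-- what changed: Replaces the repeated whole-string replace('//','/') fixpoint loop with a single stateful character scan that skips a '/' whenever the previously kept character was '/'.
import Mathlib
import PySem

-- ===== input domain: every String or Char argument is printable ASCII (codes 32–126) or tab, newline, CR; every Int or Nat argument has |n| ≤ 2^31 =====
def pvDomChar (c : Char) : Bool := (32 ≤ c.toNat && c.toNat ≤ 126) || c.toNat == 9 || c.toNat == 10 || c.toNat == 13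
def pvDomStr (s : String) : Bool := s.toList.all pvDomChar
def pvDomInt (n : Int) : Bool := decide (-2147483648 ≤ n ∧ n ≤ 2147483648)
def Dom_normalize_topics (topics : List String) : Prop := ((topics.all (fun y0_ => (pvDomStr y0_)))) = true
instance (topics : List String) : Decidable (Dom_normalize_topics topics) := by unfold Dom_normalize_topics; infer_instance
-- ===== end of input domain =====

-- B replaces A's repeated replace("//","/") fixpoint loop by a single stateful
-- character scan per topic (alternative decomposition, same results).


-- ===== PORT A =====
-- helpers for the termination of A's `while "//" in t` loop (cited in decreasing_by)

-- one pass of t.replace("//", "/"): left-to-right, non-overlapping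
def pvRep : List Char → List Char
  | [] => []
  | [c] => [c]
  | a :: b :: t => if a = '/' ∧ b = '/' then '/' :: pvRep t else a :: pvRep (b :: t)

-- `"//" in t` as a structural predicate
def pvHasDD : List Char → Bool
  | [] => false
  | [_] => false
  | a :: b :: t => (a = '/' && b = '/') || pvHasDD (b :: t)

theorem pvRep_go (fuel : Nat) : ∀ (l acc : List Char), l.length ≤ fuel →
    PySem.Chars.replace.go ['/', '/'] ['/'] fuel l acc = acc.reverse ++ pvRep l := by
  induction fuel with
  | zero =>
    intro l acc h
    have hl : l = [] := List.eq_nil_of_length_eq_zero (Nat.le_zero.mp h)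
    subst hl; simp [PySem.Chars.replace.go, pvRep]
  | succ n ih =>
    intro l acc h
    match l with
    | [] => simp [PySem.Chars.replace.go, pvRep]
    | c :: t =>
      rw [PySem.Chars.replace.go]
      by_cases hp : List.isPrefixOf ['/', '/'] (c :: t) = true
      · match t with
        | [] => simp [List.isPrefixOf] at hp
        | b :: u =>
          have hcb : c = '/' ∧ b = '/' := by
            simp [List.isPrefixOf] at hp
            exact ⟨hp.1.symm, hp.2.symm⟩
          obtain ⟨rfl, rfl⟩ := hcb
          simp only [hp, if_true, List.length_cons, List.drop_succ_cons, List.drop_zero,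
            List.length_nil]
          have hlen : u.length ≤ n := by simp at h; omega
          rw [ih _ _ hlen]
          simp [pvRep]
      · simp only [hp, if_false]
        have ht : t.length ≤ n := by simp at h; omega
        rw [ih _ _ ht]
        match t with
        | [] => simp [pvRep]
        | b :: u =>
          have hnot : ¬ (c = '/' ∧ b = '/') := by
            intro ⟨h1, h2⟩; subst h1; subst h2
            simp [List.isPrefixOf, List.isPrefixOf] at hp
          simp [pvRep, hnot]

theorem pvReplace_eq_rep (cs : List Char) :
    PySem.Chars.replace cs ['/', '/'] ['/'] = pvRep cs := by
  rw [PySem.Chars.replace]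
  simp only [List.isEmpty]
  exact pvRep_go cs.length cs [] le_rfl

theorem pvIsIn_eq_hasDD (cs : List Char) :
    PySem.Chars.isIn ['/', '/'] cs = pvHasDD cs := by
  induction cs with
  | nil => decide
  | cons a t ih =>
    match t with
    | [] =>
      rcases Bool.eq_false_or_eq_true (PySem.Chars.isIn ['/', '/'] [a]) with h | h
      · exfalso
        have hi := (PySem.Chars.isIn_iff_infix _ _).mp h
        have := hi.sublist.length_le
        simp at this
      · rw [h]; simp [pvHasDD]
    | b :: u =>
      have hiff : (['/', '/'] <:+: a :: b :: u) ↔ ((a = '/' ∧ b = '/') ∨ ['/', '/'] <:+: b :: u) := by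
        rw [List.infix_cons_iff]
        constructor
        · rintro (hp | hi)
          · left
            rw [List.cons_prefix_cons] at hp
            obtain ⟨h1, hp⟩ := hp
            rw [List.cons_prefix_cons] at hp
            exact ⟨h1.symm, hp.1.symm⟩
          · right; exact hi
        · rintro (⟨h1, h2⟩ | hi)
          · left; subst h1; subst h2
            exact (List.cons_prefix_cons).mpr ⟨rfl, (List.cons_prefix_cons).mpr ⟨rfl, List.nil_prefix⟩⟩
          · right; exact hi
      rcases Bool.eq_false_or_eq_true (PySem.Chars.isIn ['/', '/'] (a :: b :: u)) with h | h
      · rw [h]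
        have hi := (PySem.Chars.isIn_iff_infix _ _).mp h
        rw [hiff] at hi
        rcases hi with ⟨h1, h2⟩ | hi
        · simp [pvHasDD, h1, h2]
        · have hbu : pvHasDD (b :: u) = true := by
            rw [← ih]; exact (PySem.Chars.isIn_iff_infix _ _).mpr hi
          simp [pvHasDD, hbu]
      · rw [h]
        have hn := (PySem.Chars.isIn_eq_false_iff _ _).mp h
        rw [hiff] at hn
        push_neg at hn
        obtain ⟨hn1, hn2⟩ := hn
        have hbu : pvHasDD (b :: u) = false := by
          rw [← ih, PySem.Chars.isIn_eq_false_iff]; exact hn2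
        simp [pvHasDD, hbu]
        tauto

theorem pvRep_length_le (cs : List Char) : (pvRep cs).length ≤ cs.length := by
  induction cs using pvRep.induct with
  | case1 => simp [pvRep]
  | case2 c => simp [pvRep]
  | case3 a b t h ih =>
    obtain ⟨rfl, rfl⟩ := h
    have h1 := ih
    simp [pvRep]
    omega
  | case4 a b t h ih =>
    have h1 := ih
    simp only [List.length_cons] at h1
    simp [pvRep, h]
    omega

theorem pvRep_length_lt (cs : List Char) (h : pvHasDD cs = true) :
    (pvRep cs).length < cs.length := by
  induction cs using pvRep.induct with
  | case1 => simp [pvHasDD] at h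
  | case2 c => simp [pvHasDD] at h
  | case3 a b t hab ih =>
    obtain ⟨rfl, rfl⟩ := hab
    have h1 := pvRep_length_le t
    simp [pvRep]
    omega
  | case4 a b t hab ih =>
    have hdd : pvHasDD (b :: t) = true := by
      simp [pvHasDD] at h
      rcases h with ⟨h1, h2⟩ | h
      · exact absurd ⟨h1, h2⟩ hab
      · exact h
    have h1 := ih hdd
    simp only [List.length_cons] at h1
    simp [pvRep, hab]
    omega

-- the `while "//" in t: t = t.replace("//", "/")` loop of A, verbatim
def pvCollapseLoop (cs : List Char) : List Char :=
  if h : PySem.Chars.isIn ['/', '/'] cs = true then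
    pvCollapseLoop (PySem.Chars.replace cs ['/', '/'] ['/'])
  else cs
termination_by cs.length
decreasing_by
  rw [pvReplace_eq_rep]
  exact pvRep_length_lt cs (by rw [← pvIsIn_eq_hasDD]; exact h)

def normalize_topics (topics : List String) : List String :=
  topics.foldl (fun out t =>
    -- `(t or "").strip()`: on strings `t or ""` is `t` when nonempty, else ""
    let u := (PySem.Str.strip (if t = "" then "" else t)).toList
    if u = [] then out                                  -- `if not t: continue`
    else out ++ [String.mk (pvCollapseLoop u)]) []

-- ===== PORT B =====
def normalize_topics_alt (topics : List String) : List String :=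
  topics.foldl (fun out t =>
    let u := (PySem.Str.strip (if t = "" then "" else t)).toList
    if u = [] then out
    else
      out ++ [String.mk (u.foldl
        (fun buf c => if c = '/' ∧ buf.getLast? = some '/' then buf else buf ++ [c]) [])]) []

-- ===== PRECONDITION & SPEC =====
def Spec_normalize_topics (topics : List String) (out : List String) : Prop := out = normalize_topics_alt topics
instance (topics : List String) (out : List String) : Decidable (Spec_normalize_topics topics out) := by unfold Spec_normalize_topics; infer_instance

-- ===== CLAIM (what is proved, stated in full; the proofs are below) =====
def Claim_equal_normalize_topics : Prop := ∀ (topics : List String), Dom_normalize_topics topics → Spec_normalize_topics topics (normalize_topics topics)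

-- ===== LEMMAS AND PROOFS =====

-- canonical collapse: prev kept char is p, skip a '/' directly after a '/'
def pvDD (p : Char) : List Char → List Char
  | [] => []
  | c :: t => if c = '/' ∧ p = '/' then pvDD p t else c :: pvDD c t

def pvCollapse : List Char → List Char
  | [] => []
  | c :: t => c :: pvDD c t

theorem pvDD_rep : ∀ (t : List Char) (p : Char), pvDD p (pvRep t) = pvDD p t := by
  intro t
  induction t using pvRep.induct with
  | case1 => intro p; rfl
  | case2 c => intro p; rfl
  | case3 a b t hab ih =>
    intro p
    obtain ⟨rfl, rfl⟩ := hab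
    by_cases hp : p = '/'
    · subst hp
      simp [pvRep, pvDD, ih '/']
    · simp [pvRep, pvDD, hp, ih '/']
  | case4 a b t hab ih =>
    intro p
    by_cases hc : a = '/' ∧ p = '/'
    · obtain ⟨rfl, rfl⟩ := hc
      have hb : ¬ b = '/' := fun hb => hab ⟨rfl, hb⟩
      simp [pvRep, pvDD, hb, ih '/']
    · simp [pvRep, pvDD, hab, hc, ih a]

theorem pvCollapse_rep (cs : List Char) : pvCollapse (pvRep cs) = pvCollapse cs := by
  match cs with
  | [] => rfl
  | [c] => rfl
  | a :: b :: t =>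
    by_cases hab : a = '/' ∧ b = '/'
    · obtain ⟨rfl, rfl⟩ := hab
      simp [pvRep, pvCollapse, pvDD, pvDD_rep]
    · simp [pvRep, pvCollapse, hab, pvDD_rep]

theorem pvDD_noDD : ∀ (t : List Char) (p : Char), pvHasDD (p :: t) = false → pvDD p t = t := by
  intro t
  induction t with
  | nil => intro p _; rfl
  | cons c u ih =>
    intro p h
    simp [pvHasDD] at h
    obtain ⟨h1, h2⟩ := h
    have hc : ¬ (c = '/' ∧ p = '/') := by
      intro ⟨a1, a2⟩; exact absurd (h1 a2) (by simp [a1])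
    simp only [pvDD, if_neg hc]
    rw [ih c h2]

theorem pvCollapse_noDD (cs : List Char) (h : pvHasDD cs = false) : pvCollapse cs = cs := by
  match cs with
  | [] => rfl
  | c :: t => simp only [pvCollapse]; rw [pvDD_noDD t c h]

theorem pvCollapseLoop_eq (cs : List Char) : pvCollapseLoop cs = pvCollapse cs := by
  induction cs using pvCollapseLoop.induct with
  | case1 cs h ih =>
    rw [pvCollapseLoop, dif_pos h, ih, pvReplace_eq_rep, pvCollapse_rep]
  | case2 cs h =>
    rw [pvCollapseLoop, dif_neg h, pvCollapse_noDD]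
    rw [← pvIsIn_eq_hasDD]
    simpa using h

theorem pvFold_dd : ∀ (cs buf : List Char) (p : Char), buf.getLast? = some p →
    cs.foldl (fun buf c => if c = '/' ∧ buf.getLast? = some '/' then buf else buf ++ [c]) buf
      = buf ++ pvDD p cs := by
  intro cs
  induction cs with
  | nil => intro buf p _; simp [pvDD]
  | cons c t ih =>
    intro buf p hp
    simp only [List.foldl_cons]
    by_cases hc : c = '/' ∧ p = '/'
    · obtain ⟨rfl, rfl⟩ := hc
      rw [if_pos ⟨rfl, hp⟩]
      have hd : pvDD '/' ('/' :: t) = pvDD '/' t := by simp [pvDD]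
      rw [hd]
      exact ih buf '/' hp
    · have hcond : ¬ (c = '/' ∧ buf.getLast? = some '/') := by
        intro ⟨a1, a2⟩
        rw [hp] at a2
        exact hc ⟨a1, Option.some_inj.mp a2⟩
      rw [if_neg hcond]
      have hd : pvDD p (c :: t) = c :: pvDD c t := by simp [pvDD, hc]
      rw [hd, ih (buf ++ [c]) c (by simp)]
      simp

theorem pvFold_eq_collapse (cs : List Char) :
    cs.foldl (fun buf c => if c = '/' ∧ buf.getLast? = some '/' then buf else buf ++ [c]) []
      = pvCollapse cs := by
  match cs with
  | [] => rfl
  | c :: t =>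
    simp only [List.foldl_cons]
    rw [show (if c = '/' ∧ (List.getLast? ([] : List Char)) = some '/' then ([] : List Char) else [] ++ [c]) = [c] by simp]
    rw [pvFold_dd t [c] c (by simp)]
    simp [pvCollapse]

-- ===== VERDICT (by name: the statement is the Claim_ definition above) =====
theorem normalize_topics_spec : Claim_equal_normalize_topics := by
  intro topics _
  unfold Spec_normalize_topics normalize_topics normalize_topics_alt
  have hfun : (fun (out : List String) (t : String) =>
        let u := (PySem.Str.strip (if t = "" then "" else t)).toList
        if u = [] then out
        else out ++ [String.mk (pvCollapseLoop u)])
      = (fun (out : List String) (t : String) =>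
        let u := (PySem.Str.strip (if t = "" then "" else t)).toList
        if u = [] then out
        else out ++ [String.mk (u.foldl
          (fun buf c => if c = '/' ∧ buf.getLast? = some '/' then buf else buf ++ [c]) [])]) := by
    funext out t
    simp only [pvCollapseLoop_eq, pvFold_eq_collapse]
  rw [hfun]
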